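-- pv_equiv track=rewrite | github.com/gka0903/Coding_Test | Resource/Brute_Force/n^2 배열 자르기.py | solution
-- ===== SOURCE A (Python) =====
-- def solution(n, left, right):
--     answer = []
--     start = (left // n, left % n)
--     end = (right // n, right % n)
--
--     for i in range(start[0], end[0] + 1):
--         number = (i + 1)
--
--         for j in range(n):
--             if i < j:
--                 number += 1
--
--             if i == start[0] and j < start[1]:
--                 continue
--
--             answer.append(number)
--
--             if i == end[0] and j == end[1]:
--                 break
--
--     return answer
-- ===== SOURCE B (Python) =====
-- def solution(n, left, right):
--     return [max(k // n, k % n) + 1 for k in range(left, right + 1)]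
-- ===== Notes on version B (the rewrite author's own statement) =====
-- stated objective: simpler
-- what changed: Replaces A's nested row/column loops with continue/break skip logic and an incremental counter by a single pass over the flat index range computing each element independently with the closed form max(k//n, k%n)+1.
-- outside the precondition, e.g. on solution(3, 2, 1): A returns [3], B returns []; on solution(2, -3, 1): A returns [1, 1, 2, 1, 2], B returns [2, 1, 2, 1, 2]; on solution(-2, 0, 3): A returns [], B returns [1, 0, 1, 0]
import Mathlib
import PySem

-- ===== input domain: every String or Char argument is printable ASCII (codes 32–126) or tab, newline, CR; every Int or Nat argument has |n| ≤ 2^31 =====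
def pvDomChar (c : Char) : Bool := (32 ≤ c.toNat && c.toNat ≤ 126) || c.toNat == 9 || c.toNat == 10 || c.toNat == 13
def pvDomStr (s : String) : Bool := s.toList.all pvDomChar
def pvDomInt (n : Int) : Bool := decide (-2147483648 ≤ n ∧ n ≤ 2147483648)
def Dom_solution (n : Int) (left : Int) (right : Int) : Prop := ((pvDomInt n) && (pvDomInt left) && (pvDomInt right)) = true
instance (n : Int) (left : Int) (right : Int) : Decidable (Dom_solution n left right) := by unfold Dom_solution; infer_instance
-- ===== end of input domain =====

-- B drops A's nested row/column loops, skip/break logic and running counter for one flat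
-- pass computing each element by the closed form max(k//n, k%n)+1 (objective: simpler).

-- ===== PORT A =====
-- inner `for j in range(n)` loop: carries (remaining j's, number, answer); `continue`
-- and `break` become the two non-append / early-return branches, in Python's order.
def solA_inner (start0 s1 e0 e1 i : Int) : List Int → Int → List Int → List Int
  | [], _, ans => ans
  | j :: js, number, ans =>
    let number := if i < j then number + 1 else number
    if i = start0 ∧ j < s1 then solA_inner start0 s1 e0 e1 i js number ans
    else
      let ans := ans ++ [number]
      if i = e0 ∧ j = e1 then ans
      else solA_inner start0 s1 e0 e1 i js number ans

def solution (n : Int) (left : Int) (right : Int) : List Int :=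
  let start0 := PySem.Int.floordiv left n
  let s1 := PySem.Int.mod left n
  let e0 := PySem.Int.floordiv right n
  let e1 := PySem.Int.mod right n
  (PySem.List.pyRange start0 (e0 + 1) 1).foldl
    (fun ans i => solA_inner start0 s1 e0 e1 i (PySem.List.pyRange 0 n 1) (i + 1) ans) []

-- ===== PORT B =====
def pvVal (n k : Int) : Int := max (PySem.Int.floordiv k n) (PySem.Int.mod k n) + 1

def solution_alt (n : Int) (left : Int) (right : Int) : List Int :=
  (PySem.List.pyRange left (right + 1) 1).map (pvVal n)

-- ===== PRECONDITION & SPEC =====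
-- Pre_ excludes: n = 0 (Python A raises ZeroDivisionError); n < 0 with left ≤ right and
-- n ≥ 1 with left < -n, where A's empty inner range resp. its increment-counter arithmetic
-- produce accidental values; and left > right inside one row, where A still emits a partial row.
def Pre_solution (n : Int) (left : Int) (right : Int) : Prop :=
  (1 ≤ n ∧ -n ≤ left ∧ left ≤ right) ∨
  (n ≤ -1 ∧ right < left) ∨
  (1 ≤ n ∧ right < left ∧ PySem.Int.floordiv right n < PySem.Int.floordiv left n)
instance (n : Int) (left : Int) (right : Int) : Decidable (Pre_solution n left right) := by
  unfold Pre_solution; infer_instance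

def pvWitness_solution : Int × Int × Int := (3, 2, 7)

def Spec_solution (n : Int) (left : Int) (right : Int) (out : List Int) : Prop := out = solution_alt n left right
instance (n : Int) (left : Int) (right : Int) (out : List Int) : Decidable (Spec_solution n left right out) := by unfold Spec_solution; infer_instance

-- ===== CLAIM (what is proved, stated in full; the proofs are below) =====
def Claim_equal_solution : Prop := ∀ (n : Int) (left : Int) (right : Int), Dom_solution n left right → Pre_solution n left right → Spec_solution n left right (solution n left right)


-- ===== LEMMAS AND PROOFS =====

-- with an empty inner range (n ≤ 0) the whole fold leaves the accumulator unchanged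
theorem solA_foldl_nil (start0 s1 e0 e1 : Int) :
    ∀ (l : List Int) (ans : List Int),
      l.foldl (fun ans i => solA_inner start0 s1 e0 e1 i [] (i + 1) ans) ans = ans := by
  intro l
  induction l with
  | nil => intro ans; rfl
  | cons x xs ih => intro ans; simpa only [List.foldl_cons] using ih ans

-- value of B's closed form on cell (i, j) of the grid
theorem pvVal_cell (n i j : Int) (hn : 1 ≤ n) (h0 : 0 ≤ j) (hj : j < n) :
    pvVal n (i * n + j) = max i j + 1 := by
  have hpos : (0 : Int) < n := by omega
  have hdiv : PySem.Int.floordiv (i * n + j) n = i := by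
    rw [PySem.Int.floordiv_eq_iff_of_pos hpos]
    constructor <;> nlinarith
  have hmod : PySem.Int.mod (i * n + j) n = j := by
    have := PySem.Int.floordiv_mul_add_mod (i * n + j) n
    rw [hdiv] at this; omega
  simp [pvVal, hdiv, hmod]

-- the running counter's update: entering column j with value max i (j-1) + 1,
-- `if i < j then +1` yields max i j + 1
theorem pvNum_step (i j : Int) :
    (if i < j then max i (j - 1) + 1 + 1 else max i (j - 1) + 1) = max i j + 1 := by
  rcases le_total i (j - 1) with h | h <;> rcases le_total i j with h' | h' <;>
    simp [h, h'] <;> omega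

-- skip phase of the first row: the `continue` branch advances a from 0 up to s1
theorem solA_inner_skip (n s1 e0 e1 i : Int) (hs : s1 ≤ n) :
    ∀ (d : Nat) (a : Int) (ans : List Int), (s1 - a).toNat = d → 0 ≤ a → a ≤ s1 →
    solA_inner i s1 e0 e1 i (PySem.List.pyRange a n 1) (max i (a - 1) + 1) ans
      = solA_inner i s1 e0 e1 i (PySem.List.pyRange s1 n 1) (max i (s1 - 1) + 1) ans := by
  intro d
  induction d with
  | zero =>
    intro a ans hd h0 ha
    obtain rfl : a = s1 := by omega
    rfl
  | succ k ih =>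
    intro a ans hd h0 ha
    have hlt : a < s1 := by omega
    rw [PySem.List.pyRange_one_cons (show a < n by omega)]
    show (if i = i ∧ a < s1 then _ else _) = _
    rw [pvNum_step i a, if_pos ⟨rfl, hlt⟩]
    have h1 : max i a + 1 = max i ((a + 1) - 1) + 1 := by norm_num
    rw [h1, ih (a + 1) ans (by omega) (by omega) (by omega)]

-- a full row i ≠ e0 (no break): appends cells a..n-1 with values max i j + 1
theorem solA_inner_full (n start0 s1 e0 e1 i : Int) (hn : 1 ≤ n) (hne : i ≠ e0) :
    ∀ (d : Nat) (a : Int) (ans : List Int), (n - a).toNat = d → 0 ≤ a → a ≤ n →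
      (i = start0 → s1 ≤ a) →
    solA_inner start0 s1 e0 e1 i (PySem.List.pyRange a n 1) (max i (a - 1) + 1) ans
      = ans ++ (PySem.List.pyRange (i * n + a) (i * n + n) 1).map (pvVal n) := by
  intro d
  induction d with
  | zero =>
    intro a ans hd h0 han hsk
    obtain rfl : a = n := by omega
    rw [PySem.List.pyRange_one_eq_nil (le_refl a),
      PySem.List.pyRange_one_eq_nil (show i * a + a ≤ i * a + a from le_refl _)]
    simp [solA_inner]
  | succ k ih =>
    intro a ans hd h0 han hsk
    have ha : a < n := by omega
    rw [PySem.List.pyRange_one_cons (show a < n by omega)]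
    show (if i = start0 ∧ a < s1 then _ else _) = _
    rw [pvNum_step i a]
    rw [if_neg (by rintro ⟨h1, h2⟩; have := hsk h1; omega)]
    rw [if_neg (by rintro ⟨h1, _⟩; exact hne h1)]
    have hrec := ih (a + 1) (ans ++ [max i a + 1]) (by omega) (by omega) (by omega)
      (fun h => by have := hsk h; omega)
    have hsimp : a + 1 - 1 = a := by omega
    rw [hsimp] at hrec
    rw [hrec, PySem.List.pyRange_one_cons (show i * n + a < i * n + n by omega)]
    rw [List.map_cons, pvVal_cell n i a hn h0 ha,
      show i * n + a + 1 = i * n + (a + 1) by ring]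
    simp

-- the last row i = e0: appends cells a..e1 with values max e0 j + 1, then breaks
theorem solA_inner_last (n start0 s1 e1 e0 : Int) (hn : 1 ≤ n)
    (he1a : 0 ≤ e1) (he1b : e1 < n) :
    ∀ (d : Nat) (a : Int) (ans : List Int), (e1 - a).toNat = d → 0 ≤ a → a ≤ e1 →
      (e0 = start0 → s1 ≤ a) →
    solA_inner start0 s1 e0 e1 e0 (PySem.List.pyRange a n 1) (max e0 (a - 1) + 1) ans
      = ans ++ (PySem.List.pyRange (e0 * n + a) (e0 * n + e1 + 1) 1).map (pvVal n) := by
  intro d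
  induction d with
  | zero =>
    intro a ans hd h0 hae hsk
    obtain rfl : a = e1 := by omega
    rw [PySem.List.pyRange_one_cons (show a < n by omega)]
    show (if e0 = start0 ∧ a < s1 then _ else _) = _
    rw [pvNum_step e0 a]
    rw [if_neg (by rintro ⟨h1, h2⟩; have := hsk h1; omega)]
    rw [if_pos ⟨rfl, rfl⟩]
    rw [show e0 * n + a + 1 = (e0 * n + a) + 1 by ring,
      PySem.List.pyRange_one_singleton (e0 * n + a), List.map_singleton,
      pvVal_cell n e0 a hn h0 he1b]
  | succ k ih =>
    intro a ans hd h0 hae hsk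
    have ha : a < e1 := by omega
    rw [PySem.List.pyRange_one_cons (show a < n by omega)]
    show (if e0 = start0 ∧ a < s1 then _ else _) = _
    rw [pvNum_step e0 a]
    rw [if_neg (by rintro ⟨h1, h2⟩; have := hsk h1; omega)]
    rw [if_neg (by rintro ⟨_, h2⟩; omega)]
    have hrec := ih (a + 1) (ans ++ [max e0 a + 1]) (by omega) (by omega) (by omega)
      (fun h => by have := hsk h; omega)
    have hsimp : a + 1 - 1 = a := by omega
    rw [hsimp] at hrec
    rw [hrec, PySem.List.pyRange_one_cons (show e0 * n + a < e0 * n + e1 + 1 by omega)]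
    rw [List.map_cons, pvVal_cell n e0 a hn h0 (by omega),
      show e0 * n + a + 1 = e0 * n + (a + 1) by ring]
    simp

-- the outer row loop: folding rows i0..e0 appends the flat segment from the row's
-- first flat index through right = e0*n+e1
theorem solA_outer (n start0 s1 e0 e1 : Int) (hn : 1 ≤ n)
    (hs0 : -1 ≤ start0) (hs1a : 0 ≤ s1) (hs1b : s1 < n)
    (he1a : 0 ≤ e1) (he1b : e1 < n) (hse : start0 = e0 → s1 ≤ e1) :
    ∀ (d : Nat) (i0 : Int) (ans : List Int), (e0 - i0).toNat = d → start0 ≤ i0 → i0 ≤ e0 →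
    (PySem.List.pyRange i0 (e0 + 1) 1).foldl
        (fun ans i => solA_inner start0 s1 e0 e1 i (PySem.List.pyRange 0 n 1) (i + 1) ans) ans
      = ans ++ (PySem.List.pyRange (if i0 = start0 then start0 * n + s1 else i0 * n)
          (e0 * n + e1 + 1) 1).map (pvVal n) := by
  intro d
  induction d with
  | zero =>
    intro i0 ans hd hlo hhi
    obtain rfl : i0 = e0 := by omega
    have hi0 : -1 ≤ i0 := by omega
    rw [PySem.List.pyRange_one_singleton i0]
    simp only [List.foldl_cons, List.foldl_nil]
    have hnum : i0 + 1 = max i0 ((0:Int) - 1) + 1 := by rw [max_eq_left (by omega)]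
    by_cases hst : i0 = start0
    · subst hst
      rw [if_pos rfl, hnum,
        solA_inner_skip n s1 i0 e1 i0 (by omega) (s1 - 0).toNat 0 ans rfl (by omega) (by omega),
        solA_inner_last n i0 s1 e1 i0 hn he1a he1b
          (e1 - s1).toNat s1 ans rfl hs1a (hse rfl) (fun _ => le_refl s1)]
    · rw [if_neg hst, hnum,
        solA_inner_last n start0 s1 e1 i0 hn he1a he1b
          (e1 - 0).toNat 0 ans rfl (le_refl 0) he1a (fun h => absurd h hst)]
      norm_num
  | succ k ih =>
    intro i0 ans hd hlo hhi
    have hlt : i0 < e0 := by omega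
    have hi0 : -1 ≤ i0 := by omega
    rw [PySem.List.pyRange_one_cons (show i0 < e0 + 1 by omega)]
    simp only [List.foldl_cons]
    have hnum : i0 + 1 = max i0 ((0:Int) - 1) + 1 := by rw [max_eq_left (by omega)]
    have hfull : ∀ (a : Int), 0 ≤ a → a ≤ n → (i0 = start0 → s1 ≤ a) →
        solA_inner start0 s1 e0 e1 i0 (PySem.List.pyRange a n 1) (max i0 (a-1) + 1) ans
          = ans ++ (PySem.List.pyRange (i0 * n + a) (i0 * n + n) 1).map (pvVal n) :=
      fun a h0 han hsk =>
        solA_inner_full n start0 s1 e0 e1 i0 hn (by omega) (n - a).toNat a ans rfl h0 han hsk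
    have hrow : solA_inner start0 s1 e0 e1 i0 (PySem.List.pyRange 0 n 1) (i0 + 1) ans
        = ans ++ (PySem.List.pyRange (if i0 = start0 then start0 * n + s1 else i0 * n)
            (i0 * n + n) 1).map (pvVal n) := by
      by_cases hst : i0 = start0
      · subst hst
        rw [if_pos rfl, hnum,
          solA_inner_skip n s1 e0 e1 i0 (by omega) (s1 - 0).toNat 0 ans rfl (by omega) (by omega),
          hfull s1 hs1a (by omega) (fun _ => le_refl s1)]
      · rw [if_neg hst, hnum, hfull 0 (le_refl 0) (by omega) (fun h => absurd h hst)]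
        norm_num
    rw [hrow, ih (i0 + 1) _ (by omega) (by omega) (by omega)]
    rw [if_neg (show ¬ i0 + 1 = start0 by omega)]
    have h1 : i0 * n + n ≤ e0 * n + e1 + 1 := by nlinarith
    have key : ∀ lo : Int, lo ≤ i0 * n + n →
        PySem.List.pyRange lo (e0 * n + e1 + 1) 1
          = PySem.List.pyRange lo (i0 * n + n) 1
            ++ PySem.List.pyRange ((i0 + 1) * n) (e0 * n + e1 + 1) 1 := by
      intro lo hlo2
      rw [show (i0 + 1) * n = i0 * n + n by ring]
      exact PySem.List.pyRange_one_append lo (i0 * n + n) _ hlo2 h1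
    have hle : (if i0 = start0 then start0 * n + s1 else i0 * n) ≤ i0 * n + n := by
      by_cases hst : i0 = start0
      · rw [if_pos hst, ← hst]; nlinarith
      · rw [if_neg hst]; nlinarith
    rw [key _ hle, List.map_append, List.append_assoc]

-- ===== VERDICT (by name: the statement is the Claim_ definition above) =====
theorem solution_spec : Claim_equal_solution := by
  intro n left right _hdom hpre
  unfold Spec_solution solution solution_alt
  rcases hpre with ⟨hn, hl, hlr⟩ | ⟨hn, hrl⟩ | ⟨hn, hrl, hrow⟩
  · -- main case: n ≥ 1, -n ≤ left ≤ right
    have hpos : (0 : Int) < n := by omega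
    set start0 := PySem.Int.floordiv left n with hstart0
    set s1 := PySem.Int.mod left n with hs1
    set e0 := PySem.Int.floordiv right n with he0
    set e1 := PySem.Int.mod right n with he1
    have hleft : start0 * n + s1 = left := PySem.Int.floordiv_mul_add_mod left n
    have hright : e0 * n + e1 = right := PySem.Int.floordiv_mul_add_mod right n
    have hs1b : 0 ≤ s1 ∧ s1 < n := by
      rw [hs1, PySem.Int.mod_eq_emod_of_pos hpos]
      exact ⟨Int.emod_nonneg _ (by omega), Int.emod_lt_of_pos _ hpos⟩
    have he1b : 0 ≤ e1 ∧ e1 < n := by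
      rw [he1, PySem.Int.mod_eq_emod_of_pos hpos]
      exact ⟨Int.emod_nonneg _ (by omega), Int.emod_lt_of_pos _ hpos⟩
    have hs0 : -1 ≤ start0 := by
      by_contra h
      have h2 : start0 ≤ -2 := by omega
      nlinarith [mul_le_mul_of_nonneg_right h2 (show (0:Int) ≤ n by omega), hs1b.1, hs1b.2]
    have hse : start0 ≤ e0 := by
      by_contra h
      have h2 : e0 + 1 ≤ start0 := by omega
      nlinarith [mul_le_mul_of_nonneg_right h2 (show (0:Int) ≤ n by omega),
        hs1b.1, hs1b.2, he1b.1, he1b.2]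
    have hsee : start0 = e0 → s1 ≤ e1 := by intro h; rw [h] at hleft; omega
    have hmain := solA_outer n start0 s1 e0 e1 hn hs0 hs1b.1 hs1b.2 he1b.1 he1b.2 hsee
      (e0 - start0).toNat start0 [] rfl (le_refl _) hse
    rw [if_pos rfl, hleft] at hmain
    rw [hmain, List.nil_append, show e0 * n + e1 + 1 = right + 1 by omega]
  · -- n ≤ -1, right < left: inner range is empty and B's flat range is empty
    rw [PySem.List.pyRange_one_eq_nil (show n ≤ (0:Int) by omega),
      PySem.List.pyRange_one_eq_nil (show right + 1 ≤ left by omega),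
      solA_foldl_nil, List.map_nil]
  · -- n ≥ 1, right < left in an earlier row: outer range and B's flat range are empty
    simp only [PySem.List.pyRange_one_eq_nil
        (show PySem.Int.floordiv right n + 1 ≤ PySem.Int.floordiv left n by omega),
      PySem.List.pyRange_one_eq_nil (show right + 1 ≤ left by omega),
      List.foldl_nil, List.map_nil]
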